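-- pv_equiv track=rewrite | github.com/gmathew90/projects | kmeans/cluster.py | prune_terms
-- ===== SOURCE A (Python) =====
-- from collections import Counter,defaultdict
--
-- def prune_terms(docs, min_df=3):
--     """ Remove terms that don't occur in at least min_df different
--     documents. Return a list of Counters. Omit documents that are empty after
--     pruning words.
--     >>> prune_terms([{'a': 1, 'b': 10}, {'a': 1}, {'c': 1}], min_df=2)
--     [Counter({'a': 1}), Counter({'a': 1})]
--     """
--     ###TODO
--     pass
--     c=Counter()
--     li=[]
--     lis=[]
--     for m in docs:
--         for n in m:
--             c.update({n:1})
--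
--     for m in c:
--         if c[m]>=min_df:
--             li.append(m)
--
--     for m in docs:
--         c=Counter()
--         for n in m:
--             if n in li:
--                 c.update({n:m[n]})
--         if (len(c)!=0):
--             lis.append(c)
--     return lis
-- ===== SOURCE B (Python) =====
-- from collections import Counter, defaultdict
--
-- def prune_terms(docs, min_df=3):
--     # Inverted index: term -> postings [(doc_index, pos_in_doc, count)], built in one scan.
--     postings = defaultdict(list)
--     for i, d in enumerate(docs):
--         for pos, (t, v) in enumerate(d.items()):
--             postings[t].append((i, pos, v))
--     # Scatter the postings of frequent terms back into per-document rows.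
--     rows = defaultdict(list)
--     for t, ps in postings.items():
--         if len(ps) >= min_df:
--             for i, pos, v in ps:
--                 rows[i].append((pos, t, v))
--     # Emit surviving documents in original order, terms restored to document order.
--     out = []
--     for i in range(len(docs)):
--         if i in rows:
--             row = sorted(rows[i], key=lambda e: e[0])
--             out.append(Counter({t: v for _, t, v in row}))
--     return out
-- ===== Notes on version B (the rewrite author's own statement) =====
-- stated objective: alternative
-- what changed: B builds an inverted index of postings (term -> (doc,pos,count)) in one scan, selects frequent terms by posting-list length, and scatters their postings back into per-document rows sorted by position, replacing A's per-occurrence linear 'term in li' scan of the frequent-term list with dict operations.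
import Mathlib
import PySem

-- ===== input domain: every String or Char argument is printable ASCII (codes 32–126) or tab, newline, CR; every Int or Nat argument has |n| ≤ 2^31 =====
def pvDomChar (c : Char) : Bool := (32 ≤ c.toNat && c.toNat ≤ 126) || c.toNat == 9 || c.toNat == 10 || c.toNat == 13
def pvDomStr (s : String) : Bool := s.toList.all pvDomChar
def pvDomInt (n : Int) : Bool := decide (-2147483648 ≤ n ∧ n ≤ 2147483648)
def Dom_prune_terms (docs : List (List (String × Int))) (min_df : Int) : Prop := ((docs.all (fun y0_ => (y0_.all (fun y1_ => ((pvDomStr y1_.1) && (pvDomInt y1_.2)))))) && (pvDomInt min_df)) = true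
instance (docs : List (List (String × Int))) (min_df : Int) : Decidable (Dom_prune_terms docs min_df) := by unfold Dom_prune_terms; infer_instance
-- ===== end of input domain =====

-- B rebuilds the result from a term-centric inverted index (postings scattered back into
-- per-document rows) instead of A's per-document rescan of the frequent-term list; same values.

-- ===== PORT A =====
-- A: the document-frequency Counter (first loop of A)
def aDF (docs : List (List (String × Int))) : PySem.Dict String Int :=
  docs.foldl (fun c m => (m.map Prod.fst).foldl (fun c n => c.modify n 0 (· + 1)) c) PySem.Dict.empty

-- A: the list `li` of frequent terms (second loop of A)
def aLi (docs : List (List (String × Int))) (min_df : Int) : List String :=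
  (aDF docs).keys.foldl (fun li n => if (aDF docs).getD n 0 ≥ min_df then li ++ [n] else li) []

-- A: per-document pruned Counter (inner loop of A's third loop)
def aDoc (li : List String) (m : List (String × Int)) : PySem.Dict String Int :=
  (m.map Prod.fst).foldl (fun c n =>
    if n ∈ li then c.modify n 0 (· + (PySem.Dict.mk m).getD n 0) else c) PySem.Dict.empty

def prune_terms (docs : List (List (String × Int))) (min_df : Int) : List (List (String × Int)) :=
  docs.foldl (fun lis m =>
    if (aDoc (aLi docs min_df) m).size ≠ 0 then lis ++ [(aDoc (aLi docs min_df) m).items] else lis) []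

-- ===== PORT B =====
-- B: inverted index term -> postings [(doc_index, pos_in_doc, count)]
def bPostings (docs : List (List (String × Int))) : PySem.Dict String (List (Int × Int × Int)) :=
  (PySem.List.enumerate docs 0).foldl (fun po p =>
    (PySem.List.enumerate p.2 0).foldl (fun po q =>
      po.modify q.2.1 [] (· ++ [(p.1, q.1, q.2.2)])) po) PySem.Dict.empty

-- B: scatter the postings of frequent terms into per-document rows [(pos, term, count)]
def bRows (docs : List (List (String × Int))) (min_df : Int) : PySem.Dict Int (List (Int × String × Int)) :=
  (bPostings docs).items.foldl (fun r tp =>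
    if (tp.2.length : Int) ≥ min_df then
      tp.2.foldl (fun r e => r.modify e.1 [] (· ++ [(e.2.1, tp.1, e.2.2)])) r
    else r) PySem.Dict.empty

-- B: one emitted document: its row sorted back to document order, turned into a dict
def bEmit (row : List (Int × String × Int)) : List (String × Int) :=
  ((PySem.List.sorted row (fun e => e.1)).foldl
    (fun d e => d.insert e.2.1 e.2.2) (PySem.Dict.empty : PySem.Dict String Int)).items

def prune_terms_alt (docs : List (List (String × Int))) (min_df : Int) : List (List (String × Int)) :=
  (PySem.List.pyRange 0 (docs.length : Int)).foldl (fun out i =>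
    if (bRows docs min_df).contains i then out ++ [bEmit ((bRows docs min_df).getD i [])]
    else out) []

-- ===== PRECONDITION & SPEC =====
-- Pre_ only rules out association lists that repeat a key inside one document: Python's documents
-- are dicts, which cannot carry a duplicate key, so no input the Python A accepts is excluded.
def Pre_prune_terms (docs : List (List (String × Int))) (min_df : Int) : Prop :=
  ∀ m ∈ docs, (m.map Prod.fst).Nodup
instance (docs : List (List (String × Int))) (min_df : Int) : Decidable (Pre_prune_terms docs min_df) := by
  unfold Pre_prune_terms; infer_instance

def pvWitness_prune_terms : (List (List (String × Int))) × Int :=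
  ([[("a", 1), ("b", 10)], [("a", 1)], [("c", 1)]], 2)

def Spec_prune_terms (docs : List (List (String × Int))) (min_df : Int) (out : List (List (String × Int))) : Prop :=
  out = prune_terms_alt docs min_df
instance (docs : List (List (String × Int))) (min_df : Int) (out : List (List (String × Int))) : Decidable (Spec_prune_terms docs min_df out) := by
  unfold Spec_prune_terms; infer_instance

-- ===== CLAIM (what is proved, stated in full; the proofs are below) =====
def Claim_equal_prune_terms : Prop := ∀ (docs : List (List (String × Int))) (min_df : Int), Dom_prune_terms docs min_df → Pre_prune_terms docs min_df → Spec_prune_terms docs min_df (prune_terms docs min_df)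

-- ===== LEMMAS AND PROOFS =====

-- proof-side abbreviations
def pvK (docs : List (List (String × Int))) : List String := docs.flatMap (fun m => m.map Prod.fst)
def pvQ (docs : List (List (String × Int))) (min_df : Int) (t : String) : Bool :=
  decide (((pvK docs).count t : Int) ≥ min_df)
def pvF (docs : List (List (String × Int))) (min_df : Int) (m : List (String × Int)) : List (String × Int) :=
  m.filter (fun p => pvQ docs min_df p.1)
def pvRef (docs : List (List (String × Int))) (min_df : Int) : List (List (String × Int)) :=
  (docs.map (pvF docs min_df)).filter (fun r => decide (r ≠ []))
def pvE (docs : List (List (String × Int))) : List (String × Int × Int × Int) :=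
  (PySem.List.enumerate docs 0).flatMap (fun p =>
    (PySem.List.enumerate p.2 0).map (fun q => (q.2.1, (p.1, q.1, q.2.2))))
def pvPS (docs : List (List (String × Int))) (t : String) : List (Int × Int × Int) :=
  ((pvE docs).filter (fun e => e.1 == t)).map (·.2)
def pvL (docs : List (List (String × Int))) (min_df : Int) : List (Int × Int × String × Int) :=
  (bPostings docs).items.flatMap (fun tp =>
    if (tp.2.length : Int) ≥ min_df then tp.2.map (fun e => (e.1, (e.2.1, tp.1, e.2.2))) else [])
def pvL' (docs : List (List (String × Int))) (min_df : Int) : List (Int × Int × String × Int) :=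
  ((PySem.Set.ofList (pvK docs)).map (fun t => (t, pvPS docs t))).flatMap (fun tp =>
    if (tp.2.length : Int) ≥ min_df then tp.2.map (fun e => (e.1, (e.2.1, tp.1, e.2.2))) else [])
def pvR (docs : List (List (String × Int))) (min_df : Int) (j : Nat) : List (Int × String × Int) :=
  (PySem.List.enumerate (docs.getD j []) 0).filter (fun q => pvQ docs min_df q.2.1)

lemma pv_foldl_flatMap {α β γ : Type} (l : List α) (f : α → List β) (g : γ → β → γ) (init : γ) :
    (l.flatMap f).foldl g init = l.foldl (fun a x => (f x).foldl g a) init := by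
  induction l generalizing init <;> simp [List.foldl_append, *]

lemma pv_aDF_eq (docs : List (List (String × Int))) :
    aDF docs = (pvK docs).foldl (fun c n => c.modify n 0 (· + 1)) PySem.Dict.empty := by
  rw [aDF, pvK, pv_foldl_flatMap]

lemma pv_aDF_getD (docs : List (List (String × Int))) (t : String) :
    (aDF docs).getD t 0 = ((pvK docs).count t : Int) := by
  rw [pv_aDF_eq]
  simpa using PySem.Dict.getD_foldl_modify_add_one (pvK docs) PySem.Dict.empty t

lemma pv_aDF_keys (docs : List (List (String × Int))) :
    (aDF docs).keys = PySem.Set.ofList (pvK docs) := by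
  rw [pv_aDF_eq, PySem.Dict.keys_foldl_modify (f := fun _ _ => (· + 1))]
  simp [PySem.Set.update, PySem.Set.ofList_eq_foldl]

lemma pv_mem_aLi (docs : List (List (String × Int))) (min_df : Int) (t : String) :
    t ∈ aLi docs min_df ↔ t ∈ pvK docs ∧ ((pvK docs).count t : Int) ≥ min_df := by
  rw [aLi, PySem.List.foldl_append_ite_eq_filter (p := fun n => (aDF docs).getD n 0 ≥ min_df)]
  simp [List.mem_filter, pv_aDF_keys, PySem.Set.mem_ofList, pv_aDF_getD]

lemma pv_items_foldl_modify_fresh {κ ν β : Type} [BEq κ] [LawfulBEq κ]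
    (l : List β) (k : β → κ) (d0 : ν) (f : β → ν → ν) (d : PySem.Dict κ ν)
    (hfresh : ∀ a ∈ l, d.contains (k a) = false) (hnd : (l.map k).Nodup) :
    (l.foldl (fun d a => d.modify (k a) d0 (f a)) d).items = d.items ++ l.map (fun a => (k a, f a d0)) := by
  induction l generalizing d with
  | nil => simp
  | cons a l ih =>
    simp only [List.foldl_cons, List.map_cons]
    have hfa := hfresh a (by simp)
    have hmod : d.modify (k a) d0 (f a) = d.insert (k a) (f a d0) := by
      simp [PySem.Dict.modify, PySem.Dict.getD_of_not_contains d d0 hfa]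
    have hnd' : (l.map k).Nodup := (List.nodup_cons.mp (by simpa using hnd)).2
    have hka : k a ∉ l.map k := (List.nodup_cons.mp (by simpa using hnd)).1
    rw [hmod, ih _ (fun b hb => by
        rw [PySem.Dict.contains_insert]
        have hne : k b ≠ k a := fun he => hka (he ▸ List.mem_map_of_mem hb)
        simp [hne, hfresh b (List.mem_cons_of_mem _ hb)])
      hnd']
    rw [PySem.Dict.items_insert_of_not_contains d _ hfa]
    simp

lemma pv_assoc_filter_map (m : List (String × Int)) (q : String → Bool) (h : (m.map Prod.fst).Nodup) :
    ((m.map Prod.fst).filter q).map (fun n => (n, (PySem.Dict.mk m).getD n 0)) = m.filter (fun p => q p.1) := by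
  induction m with
  | nil => simp
  | cons a m ih =>
    have h' : (m.map Prod.fst).Nodup := (List.nodup_cons.mp (by simpa using h)).2
    have ha : a.1 ∉ m.map Prod.fst := (List.nodup_cons.mp (by simpa using h)).1
    have hgd : ∀ n ∈ (m.map Prod.fst).filter q,
        (PySem.Dict.mk (a :: m)).getD n 0 = (PySem.Dict.mk m).getD n 0 := by
      intro n hn
      have hna : (a.1 == n) = false := by
        have : a.1 ≠ n := fun he => ha (he ▸ (List.mem_filter.mp hn).1)
        simpa using this
      rw [show (a : String × Int) = (a.1, a.2) from rfl, PySem.Dict.getD_eq_get?_getD,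
        PySem.Dict.get?_mk_cons, hna]
      simp [PySem.Dict.getD_eq_get?_getD]
    have hself : (PySem.Dict.mk (a :: m)).getD a.1 0 = a.2 := by
      rw [show (a : String × Int) = (a.1, a.2) from rfl, PySem.Dict.getD_eq_get?_getD,
        PySem.Dict.get?_mk_cons]
      simp
    by_cases hq : q a.1
    · simp only [List.map_cons, List.filter_cons, hq, if_pos, List.map_cons]
      rw [List.map_congr_left (fun n hn => by rw [hgd n hn]), ih h', hself]
    · simp only [List.map_cons, List.filter_cons, hq, Bool.false_eq_true, if_false]
      rw [List.map_congr_left (fun n hn => by rw [hgd n hn]), ih h']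

lemma pv_aDoc_items (li : List String) (m : List (String × Int)) (h : (m.map Prod.fst).Nodup) :
    (aDoc li m).items = m.filter (fun p => decide (p.1 ∈ li)) := by
  rw [aDoc]
  rw [show (List.foldl (fun c n => if n ∈ li then c.modify n 0 (· + (PySem.Dict.mk m).getD n 0) else c) PySem.Dict.empty (m.map Prod.fst))
      = (List.foldl (fun c n => c.modify n 0 (· + (PySem.Dict.mk m).getD n 0)) PySem.Dict.empty ((m.map Prod.fst).filter (fun n => decide (n ∈ li)))) from
    PySem.List.foldl_ite_eq_foldl_filter (fun n => n ∈ li) (fun c n => c.modify n 0 (· + (PySem.Dict.mk m).getD n 0)) (m.map Prod.fst) PySem.Dict.empty]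
  rw [pv_items_foldl_modify_fresh _ (fun n => n) 0 (fun n v => v + (PySem.Dict.mk m).getD n 0) _
      (fun a _ => PySem.Dict.contains_empty a)
      (by simpa using h.filter _)]
  rw [show (PySem.Dict.empty : PySem.Dict String Int).items = [] from rfl, List.nil_append,
    show (List.map (fun a => ((fun (n:String) => n) a, (fun n v => v + (PySem.Dict.mk m).getD n 0) a 0)) ((m.map Prod.fst).filter (fun n => decide (n ∈ li))))
       = (List.map (fun n => (n, (PySem.Dict.mk m).getD n 0)) ((m.map Prod.fst).filter (fun n => decide (n ∈ li)))) from by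
      refine List.map_congr_left (fun n _ => ?_); simp]
  exact pv_assoc_filter_map m (fun n => decide (n ∈ li)) h

lemma pv_A_eq (docs : List (List (String × Int))) (min_df : Int) (pre : Pre_prune_terms docs min_df) :
    prune_terms docs min_df = pvRef docs min_df := by
  rw [prune_terms, PySem.List.foldl_append_ite (p := fun m => (aDoc (aLi docs min_df) m).size ≠ 0)
    (f := fun m => (aDoc (aLi docs min_df) m).items)]
  simp only [List.nil_append]
  have hitems : ∀ m ∈ docs, (aDoc (aLi docs min_df) m).items = pvF docs min_df m := by
    intro m hm
    rw [pv_aDoc_items _ _ (pre m hm), pvF]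
    refine List.filter_congr (fun p hp => ?_)
    have hmem : p.1 ∈ pvK docs := List.mem_flatMap.mpr ⟨m, hm, List.mem_map_of_mem hp⟩
    simp [pvQ, pv_mem_aLi, hmem]
  have hsize : ∀ m ∈ docs, (decide ((aDoc (aLi docs min_df) m).size ≠ 0)) = decide (pvF docs min_df m ≠ []) := by
    intro m hm
    have : (aDoc (aLi docs min_df) m).size = (pvF docs min_df m).length := by
      rw [PySem.Dict.size, hitems m hm]
    simp [this, List.length_eq_zero_iff]
  calc (docs.filter (fun m => decide ((aDoc (aLi docs min_df) m).size ≠ 0))).map (fun m => (aDoc (aLi docs min_df) m).items)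
      = (docs.filter (fun m => decide (pvF docs min_df m ≠ []))).map (fun m => pvF docs min_df m) := by
        rw [List.filter_congr hsize]
        exact List.map_congr_left (fun m hm => hitems m ((List.mem_filter.mp hm).1))
    _ = pvRef docs min_df := by
        rw [pvRef, List.filter_map]; rfl

lemma pv_bPostings_eq (docs : List (List (String × Int))) :
    bPostings docs = (pvE docs).foldl (fun po e => po.modify e.1 [] (· ++ [e.2])) PySem.Dict.empty := by
  rw [bPostings, pvE, pv_foldl_flatMap]
  refine PySem.List.foldl_congr_mem _ _ _ _ (fun po p _ => ?_)
  rw [List.foldl_map]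

lemma pv_bPostings_getD (docs : List (List (String × Int))) (t : String) :
    (bPostings docs).getD t [] = pvPS docs t := by
  rw [pv_bPostings_eq, pvPS]
  simpa using PySem.Dict.getD_foldl_modify_append (pvE docs) PySem.Dict.empty t

lemma pv_bPostings_keys (docs : List (List (String × Int))) :
    (bPostings docs).keys = PySem.Set.ofList ((pvE docs).map (·.1)) := by
  rw [pv_bPostings_eq,
    PySem.Dict.keys_foldl_modify_key (pvE docs) (fun e => e.1) [] (fun _ e => (· ++ [e.2])) PySem.Dict.empty]
  simp [PySem.Set.update, PySem.Set.ofList_eq_foldl]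

lemma pv_nodup_bPostings_keys (docs : List (List (String × Int))) : (bPostings docs).keys.Nodup := by
  rw [pv_bPostings_keys]; exact PySem.Set.nodup_ofList _

lemma pv_enum_snd_map {α β : Type} (xs : List α) (f : α → β) :
    (PySem.List.enumerate xs 0).map (fun q => f q.2) = xs.map f := by
  conv_rhs => rw [← PySem.List.map_snd_enumerate xs 0]
  rw [List.map_map]
  exact List.map_congr_left (fun q _ => rfl)

lemma pv_enum_flatMap {α β : Type} (xs : List α) (h : α → List β) :
    (PySem.List.enumerate xs 0).flatMap (fun p => h p.2) = xs.flatMap h := by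
  conv_rhs => rw [← PySem.List.map_snd_enumerate xs 0]
  rw [List.flatMap_map]

lemma pv_pvE_map_fst (docs : List (List (String × Int))) :
    (pvE docs).map (·.1) = pvK docs := by
  rw [pvE, pvK, List.map_flatMap, ← pv_enum_flatMap docs (fun m => m.map Prod.fst)]
  refine List.flatMap_congr (fun p _ => ?_)
  rw [List.map_map]
  exact pv_enum_snd_map p.2 Prod.fst

lemma pv_bPostings_items (docs : List (List (String × Int))) :
    (bPostings docs).items = (PySem.Set.ofList (pvK docs)).map (fun t => (t, pvPS docs t)) := by
  rw [PySem.Dict.items_eq_map_keys _ (pv_nodup_bPostings_keys docs) [], pv_bPostings_keys, pv_pvE_map_fst]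
  exact List.map_congr_left (fun t _ => by rw [pv_bPostings_getD])

lemma pv_pvPS_len (docs : List (List (String × Int))) (t : String) :
    (pvPS docs t).length = (pvK docs).count t := by
  rw [pvPS, List.length_map, ← List.countP_eq_length_filter, ← pv_pvE_map_fst, List.count, List.countP_map]
  rfl

lemma pv_bRows_eq (docs : List (List (String × Int))) (min_df : Int) :
    bRows docs min_df = (pvL docs min_df).foldl (fun r e => r.modify e.1 [] (· ++ [e.2])) PySem.Dict.empty := by
  rw [bRows, pvL, pv_foldl_flatMap]
  refine PySem.List.foldl_congr_mem _ _ _ _ (fun r tp _ => ?_)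
  by_cases hc : (tp.2.length : Int) ≥ min_df
  · rw [if_pos hc, if_pos hc, List.foldl_map]
  · rw [if_neg hc, if_neg hc]
    rfl

lemma pv_bRows_getD (docs : List (List (String × Int))) (min_df : Int) (i : Int) :
    (bRows docs min_df).getD i [] = ((pvL docs min_df).filter (fun e => e.1 == i)).map (·.2) := by
  rw [pv_bRows_eq]
  simpa using PySem.Dict.getD_foldl_modify_append (pvL docs min_df) PySem.Dict.empty i

lemma pv_bRows_contains (docs : List (List (String × Int))) (min_df : Int) (i : Int) :
    (bRows docs min_df).contains i = true ↔ i ∈ (pvL docs min_df).map (·.1) := by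
  rw [pv_bRows_eq, PySem.Dict.contains_iff_mem_keys,
    PySem.Dict.keys_foldl_modify_key (pvL docs min_df) (fun e => e.1) [] (fun _ e => (· ++ [e.2])) PySem.Dict.empty]
  simp only [PySem.Dict.keys_empty]
  rw [show PySem.Set.update [] ((pvL docs min_df).map (fun e => e.1)) = PySem.Set.ofList ((pvL docs min_df).map (fun e => e.1)) from by
    simp [PySem.Set.update, PySem.Set.ofList_eq_foldl]]
  exact PySem.Set.mem_ofList _ i

lemma pv_mem_pvE (docs : List (List (String × Int))) (x : String × Int × Int × Int) :
    x ∈ pvE docs ↔ ∃ (j : Nat) (hj : j < docs.length) (k : Nat) (hk : k < docs[j].length),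
      x = (docs[j][k].1, ((j : Int), (k : Int), docs[j][k].2)) := by
  simp only [pvE, List.mem_flatMap, List.mem_map, PySem.List.mem_enumerate_iff]
  constructor
  · rintro ⟨p, ⟨j, hj, rfl⟩, q, ⟨k, hk, rfl⟩, rfl⟩
    exact ⟨j, hj, k, hk, by simp⟩
  · rintro ⟨j, hj, k, hk, rfl⟩
    exact ⟨(((j:Nat):Int), docs[j]), ⟨j, hj, by simp⟩, ((k:Int), docs[j][k]), ⟨k, hk, by simp⟩, rfl⟩

lemma pv_mem_pvPS (docs : List (List (String × Int))) (t : String) (e : Int × Int × Int) :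
    e ∈ pvPS docs t ↔ (t, e) ∈ pvE docs := by
  simp only [pvPS, List.mem_map, List.mem_filter, beq_iff_eq]
  constructor
  · rintro ⟨e', ⟨hmem, ht⟩, rfl⟩
    have : e' = (t, e'.2) := by rw [← ht]
    rwa [← this]
  · intro h
    exact ⟨(t, e), ⟨h, rfl⟩, rfl⟩

lemma pv_mem_pvR (docs : List (List (String × Int))) (min_df : Int) (j : Nat) (hj : j < docs.length)
    (y : Int × String × Int) :
    y ∈ pvR docs min_df j ↔ ∃ (k : Nat) (hk : k < docs[j].length),
      y = ((k : Int), docs[j][k]) ∧ pvQ docs min_df docs[j][k].1 = true := by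
  have hd : docs.getD j [] = docs[j] := List.getD_eq_getElem docs [] hj
  simp only [pvR, hd, List.mem_filter, PySem.List.mem_enumerate_iff]
  constructor
  · rintro ⟨⟨k, hk, rfl⟩, hq⟩
    exact ⟨k, hk, by simp, by simpa using hq⟩
  · rintro ⟨k, hk, rfl, hq⟩
    exact ⟨⟨k, hk, by simp⟩, by simpa using hq⟩

lemma pv_mem_pvL' (docs : List (List (String × Int))) (min_df : Int) (x : Int × Int × String × Int) :
    x ∈ pvL' docs min_df ↔ ∃ (j : Nat) (hj : j < docs.length), x.1 = (j : Int) ∧ x.2 ∈ pvR docs min_df j := by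
  simp only [pvL', List.mem_flatMap, List.mem_map]
  constructor
  · rintro ⟨tp, ⟨t, hts, rfl⟩, hx⟩
    by_cases hc : ((pvPS docs t).length : Int) ≥ min_df
    · rw [if_pos hc] at hx
      obtain ⟨e, he, rfl⟩ := List.mem_map.mp hx
      obtain ⟨j, hj, k, hk, hEq⟩ := (pv_mem_pvE docs (t, e)).mp ((pv_mem_pvPS docs t e).mp he)
      have ht : t = docs[j][k].1 := congrArg Prod.fst hEq
      have he2 : e = ((j : Int), (k : Int), docs[j][k].2) := congrArg Prod.snd hEq
      refine ⟨j, hj, by rw [he2], ?_⟩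
      rw [pv_mem_pvR docs min_df j hj]
      refine ⟨k, hk, ?_, ?_⟩
      · rw [he2, ht]
      · have : pvQ docs min_df t = true := by
          simp only [pvQ, decide_eq_true_eq]
          rwa [← pv_pvPS_len docs t]
        rwa [ht] at this
    · rw [if_neg hc] at hx
      exact absurd hx (List.not_mem_nil)
  · rintro ⟨j, hj, hx1, hx2⟩
    rw [pv_mem_pvR docs min_df j hj] at hx2
    obtain ⟨k, hk, hy, hq⟩ := hx2
    refine ⟨(docs[j][k].1, pvPS docs (docs[j][k].1)), ⟨docs[j][k].1, ?_, rfl⟩, ?_⟩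
    · rw [PySem.Set.mem_ofList]
      exact List.mem_flatMap.mpr ⟨docs[j], List.getElem_mem hj, List.mem_map_of_mem (List.getElem_mem hk)⟩
    · have hc : ((pvPS docs (docs[j][k].1)).length : Int) ≥ min_df := by
        rw [pv_pvPS_len]
        simpa [pvQ] using hq
      rw [if_pos hc]
      refine List.mem_map.mpr ⟨((j : Int), (k : Int), docs[j][k].2), ?_, ?_⟩
      · exact (pv_mem_pvPS _ _ _).mpr ((pv_mem_pvE _ _).mpr ⟨j, hj, k, hk, rfl⟩)
      · show ((j : Int), ((k : Int), docs[j][k].1, docs[j][k].2)) = x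
        rw [show ((docs[j][k].1, docs[j][k].2) : String × Int) = docs[j][k] from rfl, ← hy, ← hx1]

lemma pv_nodup_enumerate {α : Type} (xs : List α) (s : Int) : (PySem.List.enumerate xs s).Nodup :=
  (PySem.List.pairwise_lt_enumerate xs s).imp (fun {a b} hlt he => by subst he; exact absurd hlt (lt_irrefl _))

lemma pv_nodup_pvE (docs : List (List (String × Int))) : (pvE docs).Nodup := by
  rw [pvE, List.nodup_flatMap]
  constructor
  · intro p _
    refine (pv_nodup_enumerate p.2 0).map ?_
    intro q q' he
    have h1 : q.1 = q'.1 := congrArg (fun z => z.2.2.1) he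
    have h2 : q.2.1 = q'.2.1 := congrArg (fun z => z.1) he
    have h3 : q.2.2 = q'.2.2 := congrArg (fun z => z.2.2.2) he
    exact Prod.ext h1 (Prod.ext h2 h3)
  · refine (PySem.List.pairwise_lt_enumerate docs 0).imp ?_
    intro p p' hlt
    rw [Function.onFun, List.disjoint_left]
    rintro a ha ha'
    obtain ⟨q, _, rfl⟩ := List.mem_map.mp ha
    obtain ⟨q', _, he⟩ := List.mem_map.mp ha'
    have : p'.1 = p.1 := congrArg (fun z => z.2.1) he
    rw [this] at hlt
    exact absurd hlt (lt_irrefl _)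

lemma pv_nodup_pvPS (docs : List (List (String × Int))) (t : String) : (pvPS docs t).Nodup := by
  rw [pvPS]
  refine ((pv_nodup_pvE docs).filter _).map_on ?_
  intro e he e' he' hs
  have ht : e.1 = t := by simpa using (List.mem_filter.mp he).2
  have ht' : e'.1 = t := by simpa using (List.mem_filter.mp he').2
  exact Prod.ext (ht.trans ht'.symm) hs

lemma pv_nodup_pvL' (docs : List (List (String × Int))) (min_df : Int) : (pvL' docs min_df).Nodup := by
  rw [pvL', List.flatMap_map, List.nodup_flatMap]
  constructor
  · intro t _
    by_cases hc : ((pvPS docs t).length : Int) ≥ min_df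
    · rw [if_pos hc]
      refine (pv_nodup_pvPS docs t).map ?_
      intro e e' he
      have h1 : e.1 = e'.1 := congrArg (fun z => z.1) he
      have h2 : e.2.1 = e'.2.1 := congrArg (fun z => z.2.1) he
      have h3 : e.2.2 = e'.2.2 := congrArg (fun z => z.2.2.2) he
      exact Prod.ext h1 (Prod.ext h2 h3)
    · rw [if_neg hc]; exact List.nodup_nil
  · refine (PySem.Set.nodup_ofList (pvK docs)).imp ?_
    intro t t' hne
    rw [Function.onFun, List.disjoint_left]
    intro a ha ha'
    by_cases hc : ((pvPS docs t).length : Int) ≥ min_df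
    · rw [if_pos hc] at ha
      by_cases hc' : ((pvPS docs t').length : Int) ≥ min_df
      · rw [if_pos hc'] at ha'
        obtain ⟨e, _, rfl⟩ := List.mem_map.mp ha
        obtain ⟨e', _, he⟩ := List.mem_map.mp ha'
        exact hne (congrArg (fun z => z.2.2.1) he).symm
      · rw [if_neg hc'] at ha'; exact absurd ha' (List.not_mem_nil)
    · rw [if_neg hc] at ha; exact absurd ha (List.not_mem_nil)

lemma pv_pvL_eq (docs : List (List (String × Int))) (min_df : Int) :
    pvL docs min_df = pvL' docs min_df := by
  rw [pvL, pv_bPostings_items, pvL']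

lemma pv_mem_pvL (docs : List (List (String × Int))) (min_df : Int) (x : Int × Int × String × Int) :
    x ∈ pvL docs min_df ↔ ∃ (j : Nat) (hj : j < docs.length), x.1 = (j : Int) ∧ x.2 ∈ pvR docs min_df j := by
  rw [pv_pvL_eq]; exact pv_mem_pvL' docs min_df x

lemma pv_nodup_pvL (docs : List (List (String × Int))) (min_df : Int) : (pvL docs min_df).Nodup := by
  rw [pv_pvL_eq]; exact pv_nodup_pvL' docs min_df

lemma pv_pairwise_pvR (docs : List (List (String × Int))) (min_df : Int) (j : Nat) :
    (pvR docs min_df j).Pairwise (fun a b => a.1 < b.1) :=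
  (PySem.List.pairwise_lt_enumerate _ 0).filter _

lemma pv_nodup_pvR (docs : List (List (String × Int))) (min_df : Int) (j : Nat) :
    (pvR docs min_df j).Nodup :=
  (pv_pairwise_pvR docs min_df j).imp (fun {a b} hlt he => by subst he; exact absurd hlt (lt_irrefl _))

lemma pv_mem_row (docs : List (List (String × Int))) (min_df : Int) (j : Nat)
    (y : Int × String × Int) :
    y ∈ (bRows docs min_df).getD (j : Int) [] ↔ y ∈ pvR docs min_df j := by
  rw [pv_bRows_getD]
  simp only [List.mem_map, List.mem_filter, beq_iff_eq]
  constructor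
  · rintro ⟨x, ⟨hx, hx1⟩, rfl⟩
    obtain ⟨j', hj', hj'1, hj'2⟩ := (pv_mem_pvL docs min_df x).mp hx
    have : (j' : Int) = (j : Int) := by rw [← hj'1, hx1]
    have : j' = j := by exact_mod_cast this
    subst this
    exact hj'2
  · intro hy
    have hjlen : j < docs.length := by
      by_contra hge
      have : docs.getD j [] = [] := by
        rw [List.getD_eq_getElem?_getD, List.getElem?_eq_none (by omega)]; rfl
      rw [pvR, this] at hy
      simp [PySem.List.enumerate] at hy
    refine ⟨((j : Int), y), ⟨(pv_mem_pvL docs min_df _).mpr ⟨j, hjlen, rfl, hy⟩, rfl⟩, rfl⟩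

lemma pv_nodup_row (docs : List (List (String × Int))) (min_df : Int) (i : Int) :
    (((pvL docs min_df).filter (fun e => e.1 == i)).map (·.2)).Nodup := by
  refine ((pv_nodup_pvL docs min_df).filter _).map_on ?_
  intro x hx x' hx' hs
  have h1 : x.1 = i := by simpa using (List.mem_filter.mp hx).2
  have h1' : x'.1 = i := by simpa using (List.mem_filter.mp hx').2
  exact Prod.ext (h1.trans h1'.symm) hs

lemma pv_sorted_row (docs : List (List (String × Int))) (min_df : Int) (j : Nat) :
    PySem.List.sorted ((bRows docs min_df).getD (j : Int) []) (fun e => e.1) = pvR docs min_df j := by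
  refine PySem.List.sorted_eq_of_perm_of_pairwise_lt _ _ _ ?_ (pv_pairwise_pvR docs min_df j)
  refine (List.perm_ext_iff_of_nodup (pv_nodup_pvR docs min_df j) ?_).mpr
    (fun y => (pv_mem_row docs min_df j y).symm)
  rw [pv_bRows_getD]
  exact pv_nodup_row docs min_df (j : Int)

lemma pv_R_map_snd (docs : List (List (String × Int))) (min_df : Int) (j : Nat) (hj : j < docs.length) :
    (pvR docs min_df j).map (·.2) = pvF docs min_df docs[j] := by
  rw [pvR, List.getD_eq_getElem docs [] hj,
    List.filter_congr (p := fun (q : Int × String × Int) => pvQ docs min_df q.2.1)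
      (q := (fun x => pvQ docs min_df x.1) ∘ (fun (q : Int × String × Int) => q.2))
      (fun q _ => rfl),
    ← List.filter_map, pv_enum_snd_map docs[j] (fun x => x), List.map_id', pvF]

lemma pv_bEmit (docs : List (List (String × Int))) (min_df : Int) (j : Nat) (hj : j < docs.length)
    (pre : Pre_prune_terms docs min_df) :
    bEmit ((bRows docs min_df).getD (j : Int) []) = pvF docs min_df docs[j] := by
  rw [bEmit, pv_sorted_row docs min_df j]
  have hnd : ((pvR docs min_df j).map (fun e => e.2.1)).Nodup := by
    have h1 : (pvR docs min_df j).map (fun e => e.2.1) = (pvF docs min_df docs[j]).map Prod.fst := by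
      rw [← pv_R_map_snd docs min_df j hj, List.map_map]
      rfl
    rw [h1]
    have hsub := (List.filter_sublist (p := fun p => pvQ docs min_df p.1) (l := docs[j])).map Prod.fst
    exact hsub.nodup (pre docs[j] (List.getElem_mem hj))
  rw [PySem.Dict.items_foldl_insert_fresh (pvR docs min_df j) (fun e => e.2.1) (fun e => e.2.2)
    PySem.Dict.empty (fun a _ => PySem.Dict.contains_empty _) hnd]
  rw [show (PySem.Dict.empty : PySem.Dict String Int).items = [] from rfl, List.nil_append,
    ← pv_R_map_snd docs min_df j hj]

lemma pv_contains_iff (docs : List (List (String × Int))) (min_df : Int) (j : Nat) (hj : j < docs.length) :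
    (bRows docs min_df).contains (j : Int) = decide (pvF docs min_df docs[j] ≠ []) := by
  have hiff : (bRows docs min_df).contains (j : Int) = true ↔ pvF docs min_df docs[j] ≠ [] := by
    rw [pv_bRows_contains]
    constructor
    · intro h
      obtain ⟨x, hx, hx1⟩ := List.mem_map.mp h
      obtain ⟨j', hj', hj'1, hj'2⟩ := (pv_mem_pvL docs min_df x).mp hx
      have : j' = j := by exact_mod_cast hj'1.symm.trans hx1
      subst this
      rw [← pv_R_map_snd docs min_df j' hj]
      intro hnil
      rw [List.map_eq_nil_iff.mp hnil] at hj'2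
      exact absurd hj'2 (List.not_mem_nil)
    · intro h
      have : pvR docs min_df j ≠ [] := by
        intro hnil
        rw [← pv_R_map_snd docs min_df j hj, hnil] at h
        exact h rfl
      obtain ⟨y, hy⟩ := List.exists_mem_of_ne_nil _ this
      exact List.mem_map.mpr ⟨((j : Int), y), (pv_mem_pvL docs min_df _).mpr ⟨j, hj, rfl, hy⟩, rfl⟩
  cases hb : (bRows docs min_df).contains (j : Int) <;> simp_all

lemma pv_enum_filter_map {α β : Type} (xs : List α) (G : α → β) (p : β → Bool) :
    ((PySem.List.enumerate xs 0).filter (fun x => p (G x.2))).map (fun x => G x.2) = (xs.map G).filter p := by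
  conv_rhs => rw [← PySem.List.map_snd_enumerate xs 0]
  rw [List.map_map, List.filter_map]
  refine congrArg₂ _ rfl (List.filter_congr (fun x _ => rfl))

lemma pv_B_eq (docs : List (List (String × Int))) (min_df : Int) (pre : Pre_prune_terms docs min_df) :
    prune_terms_alt docs min_df = pvRef docs min_df := by
  rw [prune_terms_alt, PySem.List.foldl_append_if (p := fun i => (bRows docs min_df).contains i)
    (f := fun i => bEmit ((bRows docs min_df).getD i []))]
  rw [List.nil_append]
  rw [show PySem.List.pyRange 0 (docs.length : Int) = (PySem.List.enumerate docs 0).map (·.1) from by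
    rw [PySem.List.map_fst_enumerate]; norm_num]
  rw [List.filter_map, List.map_map]
  have hstep : ∀ p ∈ PySem.List.enumerate docs 0,
      ((fun i => (bRows docs min_df).contains i) ∘ (fun (x : Int × List (String × Int)) => x.1)) p
      = (fun x : Int × List (String × Int) => decide (pvF docs min_df x.2 ≠ [])) p := by
    intro p hp
    obtain ⟨j, hj, rfl⟩ := (PySem.List.mem_enumerate_iff docs 0 p).mp hp
    simp only [Function.comp, zero_add]
    exact pv_contains_iff docs min_df j hj
  rw [List.filter_congr hstep]
  have hmap : ∀ p ∈ (PySem.List.enumerate docs 0).filter (fun x => decide (pvF docs min_df x.2 ≠ [])),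
      ((fun i => bEmit ((bRows docs min_df).getD i [])) ∘ (fun (x : Int × List (String × Int)) => x.1)) p
      = (fun (x : Int × List (String × Int)) => pvF docs min_df x.2) p := by
    intro p hp
    obtain ⟨j, hj, rfl⟩ := (PySem.List.mem_enumerate_iff docs 0 p).mp (List.mem_filter.mp hp).1
    simp only [Function.comp, zero_add]
    exact pv_bEmit docs min_df j hj pre
  rw [List.map_congr_left hmap]
  rw [pvRef, ← pv_enum_filter_map docs (pvF docs min_df) (fun r => decide (r ≠ []))]

-- ===== VERDICT (by name: the statement is the Claim_ definition above) =====
theorem prune_terms_spec : Claim_equal_prune_terms := by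
  intro docs min_df _ pre
  unfold Spec_prune_terms
  rw [pv_A_eq docs min_df pre, pv_B_eq docs min_df pre]
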